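-- pv_equiv track=rewrite | github.com/carltonknox/TicTacToe | TTTGame.py | rowScan
-- ===== SOURCE A (Python) =====
-- def rowScan(row):
--     Xcount = 0
--     Ocount = 0
--     for XO in row:
--         if XO == 'X':
--             Xcount+=1
--         elif XO == 'O':
--             Ocount+=1
--     return (Xcount,Ocount)
-- ===== SOURCE B (Python) =====
-- def rowScan(row):
--     # Divide and conquer: split the row in halves, count each half recursively,
--     # combine by componentwise addition of the (X, O) pairs.
--     seq = list(row)
--
--     def go(lo, hi):
--         n = hi - lo
--         if n == 0:
--             return (0, 0)
--         if n == 1: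
--             v = seq[lo]
--             if v == 'X':
--                 return (1, 0)
--             if v == 'O':
--                 return (0, 1)
--             return (0, 0)
--         mid = lo + n // 2
--         x1, o1 = go(lo, mid)
--         x2, o2 = go(mid, hi)
--         return (x1 + x2, o1 + o2)
--
--     return go(0, len(seq))
-- ===== Notes on version B (the rewrite author's own statement) =====
-- stated objective: alternative
-- what changed: Replaced the single fused accumulating loop with a recursive divide-and-conquer: split the row at the midpoint, count each half recursively, and combine the (X,O) pairs by componentwise addition.
import Mathlib
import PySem

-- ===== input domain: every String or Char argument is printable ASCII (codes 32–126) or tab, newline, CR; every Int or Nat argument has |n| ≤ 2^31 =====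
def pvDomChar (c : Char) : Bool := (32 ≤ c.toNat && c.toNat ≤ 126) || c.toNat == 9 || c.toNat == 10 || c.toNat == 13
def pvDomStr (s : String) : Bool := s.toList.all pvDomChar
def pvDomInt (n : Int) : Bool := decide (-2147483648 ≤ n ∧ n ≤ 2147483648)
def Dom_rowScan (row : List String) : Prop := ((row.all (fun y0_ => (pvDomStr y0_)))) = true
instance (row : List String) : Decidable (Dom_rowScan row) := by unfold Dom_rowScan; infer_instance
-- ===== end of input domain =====

-- B replaces A's single fused counting loop with a recursive divide-and-conquer on halves (alternative decomposition; same cost).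


-- ===== PORT A =====
-- Port of A: one fused fold maintaining both counters.
def rowScan (row : List String) : Int × Int :=
  row.foldl (fun (acc : Int × Int) XO =>
    if XO == "X" then (acc.1 + 1, acc.2)
    else if XO == "O" then (acc.1, acc.2 + 1)
    else acc) (0, 0)

-- ===== PORT B =====
-- Port of B's helper go: divide and conquer on the sublist (take/drop at the midpoint).
def rowScanGo : List String → Int × Int
  | [] => (0, 0)
  | [v] => if v == "X" then (1, 0) else if v == "O" then (0, 1) else (0, 0)
  | x :: y :: rest =>
      let xs := x :: y :: rest
      let mid := xs.length / 2
      let l := rowScanGo (xs.take mid)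
      let r := rowScanGo (xs.drop mid)
      (l.1 + r.1, l.2 + r.2)
  termination_by xs => xs.length
  decreasing_by
    · simp [List.length_take]; omega
    · simp [List.length_drop]; omega

def rowScan_alt (row : List String) : Int × Int := rowScanGo row

-- ===== PRECONDITION & SPEC =====
def Spec_rowScan (row : List String) (out : Int × Int) : Prop := out = rowScan_alt row
instance (row : List String) (out : Int × Int) : Decidable (Spec_rowScan row out) := by unfold Spec_rowScan; infer_instance

-- ===== CLAIM (what is proved, stated in full; the proofs are below) =====
def Claim_equal_rowScan : Prop := ∀ (row : List String), Dom_rowScan row → Spec_rowScan row (rowScan row)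

-- ===== LEMMAS AND PROOFS =====

theorem rowScan_fold (row : List String) (a b : Int) :
    row.foldl (fun (acc : Int × Int) XO =>
      if XO == "X" then (acc.1 + 1, acc.2)
      else if XO == "O" then (acc.1, acc.2 + 1)
      else acc) (a, b)
    = (a + (row.count "X" : Int), b + (row.count "O" : Int)) := by
  induction row generalizing a b with
  | nil => simp
  | cons x xs ih =>
    simp only [List.foldl_cons, List.count_cons]
    by_cases hx : x = "X"
    · rw [if_pos (by simp [hx]), ih]; simp [hx]; ring
    · by_cases ho : x = "O"
      · rw [if_neg (by simp [hx]), if_pos (by simp [ho]), ih]; simp [ho]; ring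
      · rw [if_neg (by simp [hx]), if_neg (by simp [ho]), ih]; simp [hx, ho]

theorem rowScanGo_eq (xs : List String) :
    rowScanGo xs = ((xs.count "X" : Int), (xs.count "O" : Int)) := by
  induction xs using rowScanGo.induct with
  | case1 => simp [rowScanGo]
  | case2 v hx => simp at hx; subst hx; simp [rowScanGo]
  | case3 v hx ho => simp at hx ho; subst ho; simp [rowScanGo, hx]
  | case4 v hx ho => simp at hx ho; simp [rowScanGo, hx, ho]
  | case5 x y rest xs0 mid0 ihl ihr =>
    rw [rowScanGo]
    rw [ihl, ihr]
    have h := List.take_append_drop ((x :: y :: rest).length / 2) (x :: y :: rest)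
    have hc : ∀ s : String,
        ((x :: y :: rest).take ((x :: y :: rest).length / 2)).count s
          + ((x :: y :: rest).drop ((x :: y :: rest).length / 2)).count s
          = (x :: y :: rest).count s := by
      intro s
      conv_rhs => rw [← h]
      rw [List.count_append]
    have hX := hc "X"
    have hO := hc "O"
    simp only [xs0, mid0, Prod.mk.injEq]
    constructor <;> push_cast [← hX, ← hO] <;> ring

-- ===== VERDICT (by name: the statement is the Claim_ definition above) =====
theorem rowScan_spec : Claim_equal_rowScan := by
  intro row _
  unfold Spec_rowScan rowScan rowScan_alt
  rw [rowScan_fold, rowScanGo_eq]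
  simp
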